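-- pv_equiv track=rewrite | github.com/yuvrajb-metron/dynatrace | renovate-1.0.0/appsec_renovate/core/polling.py | _count_finding_and_scan
-- ===== SOURCE A (Python) =====
-- def _count_finding_and_scan(events: list) -> tuple[int, int]:
--     """Return (vulnerability_finding_count, vulnerability_scan_count) from event list."""
--     finding_count = sum(
--         1 for ev in events if isinstance(ev, dict) and ev.get("event.type") == "VULNERABILITY_FINDING"
--     )
--     scan_count = sum(
--         1 for ev in events if isinstance(ev, dict) and ev.get("event.type") == "VULNERABILITY_SCAN"
--     )
--     return (finding_count, scan_count)
-- ===== SOURCE B (Python) =====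
-- def _count_finding_and_scan(events: list) -> tuple[int, int]:
--     """Return (vulnerability_finding_count, vulnerability_scan_count) from event list."""
--     counts = {}
--     for ev in events:
--         if isinstance(ev, dict):
--             t = ev.get("event.type")
--             counts[t] = counts.get(t, 0) + 1
--     return (counts.get("VULNERABILITY_FINDING", 0), counts.get("VULNERABILITY_SCAN", 0))
-- ===== Notes on version B (the rewrite author's own statement) =====
-- stated objective: idiomatic
-- what changed: A makes two separate filtered passes over the event list; B makes one pass building a frequency table of event-type values and then does two constant-time lookups.
import Mathlib
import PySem

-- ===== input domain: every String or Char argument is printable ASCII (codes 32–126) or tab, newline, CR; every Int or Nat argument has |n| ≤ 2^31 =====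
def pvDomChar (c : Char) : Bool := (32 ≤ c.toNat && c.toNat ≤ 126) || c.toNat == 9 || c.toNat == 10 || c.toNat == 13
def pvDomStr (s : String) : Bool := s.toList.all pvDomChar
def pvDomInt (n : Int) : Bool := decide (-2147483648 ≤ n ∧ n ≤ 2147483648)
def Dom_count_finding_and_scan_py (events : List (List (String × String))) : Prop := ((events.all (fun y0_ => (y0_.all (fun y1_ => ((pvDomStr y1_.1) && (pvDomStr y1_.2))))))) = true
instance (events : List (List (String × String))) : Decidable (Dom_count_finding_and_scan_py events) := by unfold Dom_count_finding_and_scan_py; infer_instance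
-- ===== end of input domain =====

-- B replaces A's two filtered passes with one frequency-table pass plus two lookups (idiomatic; return value only).

-- ===== PORT A =====
-- two separate generator-sum passes, each counting one event type
def count_finding_and_scan_py (events : List (List (String × String))) : Int × Int :=
  let finding_count : Int := events.foldl
    (fun acc ev => if (PySem.Dict.mk ev).get? "event.type" == some "VULNERABILITY_FINDING" then acc + 1 else acc) 0
  let scan_count : Int := events.foldl
    (fun acc ev => if (PySem.Dict.mk ev).get? "event.type" == some "VULNERABILITY_SCAN" then acc + 1 else acc) 0
  (finding_count, scan_count)

-- ===== PORT B =====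
-- one pass building a counter dict keyed by ev.get("event.type") (None → Option.none), then two lookups
def count_finding_and_scan_py_alt (events : List (List (String × String))) : Int × Int :=
  let counts : PySem.Dict (Option String) Int := events.foldl
    (fun d ev =>
      let t := (PySem.Dict.mk ev).get? "event.type"
      d.insert t (d.getD t 0 + 1)) PySem.Dict.empty
  (counts.getD (some "VULNERABILITY_FINDING") 0, counts.getD (some "VULNERABILITY_SCAN") 0)

-- ===== PRECONDITION & SPEC =====
def Spec_count_finding_and_scan_py (events : List (List (String × String))) (out : Int × Int) : Prop := out = count_finding_and_scan_py_alt events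
instance (events : List (List (String × String))) (out : Int × Int) : Decidable (Spec_count_finding_and_scan_py events out) := by unfold Spec_count_finding_and_scan_py; infer_instance

-- ===== CLAIM (what is proved, stated in full; the proofs are below) =====
def Claim_equal_count_finding_and_scan_py : Prop := ∀ (events : List (List (String × String))), Dom_count_finding_and_scan_py events → Spec_count_finding_and_scan_py events (count_finding_and_scan_py events)

-- ===== LEMMAS AND PROOFS =====

-- A's filtered counting pass is the count of k among the mapped event types
theorem pv_foldl_if_count (l : List (List (String × String))) (k : Option String) (acc : Int) :
    l.foldl (fun acc ev => if (PySem.Dict.mk ev).get? "event.type" == k then acc + 1 else acc) acc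
      = acc + ((l.map (fun ev => (PySem.Dict.mk ev).get? "event.type")).count k : Int) := by
  induction l generalizing acc with
  | nil => simp
  | cons x xs ih =>
    simp only [List.foldl_cons, List.map_cons, List.count_cons, ih]
    by_cases h : (PySem.Dict.mk x).get? "event.type" = k
    · simp [h]; ring
    · simp [beq_eq_false_iff_ne.mpr h]

-- B's counter lookup is the same count
theorem pv_counter_lookup (l : List (List (String × String))) (k : Option String) :
    (l.foldl (fun d ev =>
        let t := (PySem.Dict.mk ev).get? "event.type"
        d.insert t (d.getD t 0 + 1)) PySem.Dict.empty).getD k 0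
      = ((l.map (fun ev => (PySem.Dict.mk ev).get? "event.type")).count k : Int) := by
  have h := PySem.Dict.getD_foldl_insert_add_one
    (l := l.map (fun ev => (PySem.Dict.mk ev).get? "event.type"))
    (v := k) (d := (PySem.Dict.empty : PySem.Dict (Option String) Int))
  rw [List.foldl_map] at h
  simpa [PySem.Dict.getD_empty] using h

-- ===== VERDICT (by name: the statement is the Claim_ definition above) =====
theorem count_finding_and_scan_py_spec : Claim_equal_count_finding_and_scan_py := by
  intro events _
  unfold Spec_count_finding_and_scan_py count_finding_and_scan_py count_finding_and_scan_py_alt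
  simp only [pv_foldl_if_count, pv_counter_lookup, Int.zero_add]
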